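-- pv_equiv track=rewrite | github.com/saisurajpydi/FINAL_SHEET_450 | Final_450/Matrix/FindSpeciPairInMat.py | findMaxVal
-- ===== SOURCE A (Python) =====
-- def findMaxVal(mat):
--     row = len(mat)
--     col = len(mat[0])
--     maxVal = 0
--     for a in range(row-1):
--         for b in range(col-1):
--             for c in range(a+1,row):
--                 for d in range(b+1,col):
--                     if(maxVal < mat[c][d] - mat[a][b]):
--                         maxVal = mat[c][d] - mat[a][b]
--     return maxVal
-- ===== SOURCE B (Python) =====
-- def findMaxVal(mat):
--     col = len(mat[0])
--     rows = [r[:col] for r in mat]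
--     best = 0
--     below = None  # elementwise: below[j] = max of mat[i][k] over processed rows i, cols k >= j
--     for a in range(len(rows) - 2, -1, -1):
--         r = rows[a + 1]
--         # suffix maxima of the row just below
--         rs = r[:]
--         for j in range(col - 2, -1, -1):
--             if rs[j] < rs[j + 1]:
--                 rs[j] = rs[j + 1]
--         below = rs if below is None else [x if y < x else y for x, y in zip(rs, below)]
--         cur = rows[a]
--         for b in range(col - 1):
--             v = below[b + 1] - cur[b]
--             if best < v:
--                 best = v
--     return best
-- ===== Notes on version B (the rewrite author's own statement) =====
-- stated objective: faster
-- what changed: Replaces A's quadruple loop (for every cell, rescanning the whole lower-right submatrix) by a single bottom-up sweep that maintains per-column suffix maxima of the rows below, so each cell's best partner is a constant-time lookup.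
import Mathlib
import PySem

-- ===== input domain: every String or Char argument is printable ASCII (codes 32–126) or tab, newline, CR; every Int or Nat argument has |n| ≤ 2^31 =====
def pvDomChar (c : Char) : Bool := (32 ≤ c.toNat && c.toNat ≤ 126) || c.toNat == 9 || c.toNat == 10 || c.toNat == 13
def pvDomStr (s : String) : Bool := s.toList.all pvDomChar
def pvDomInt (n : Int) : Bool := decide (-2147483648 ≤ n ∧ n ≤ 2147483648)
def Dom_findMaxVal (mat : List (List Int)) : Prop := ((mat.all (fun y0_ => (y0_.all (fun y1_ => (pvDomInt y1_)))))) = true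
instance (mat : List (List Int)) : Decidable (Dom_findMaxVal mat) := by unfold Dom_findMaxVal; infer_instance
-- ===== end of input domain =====

-- B replaces A's quadruple loop by a bottom-up suffix-maximum sweep (one pass over the
-- matrix), an asymptotic speed-up; return values agree on every input where A returns.

-- ===== PORT A =====
-- mat[c][d] with both indexes in range (Pre_ excludes the IndexError inputs)
def pvGet2 (mat : List (List Int)) (i j : Int) : Int :=
  PySem.List.pyGetD (PySem.List.pyGetD mat i []) j 0

def findMaxVal (mat : List (List Int)) : Int :=
  let row : Int := mat.length
  let col : Int := (mat.headD []).length   -- len(mat[0]); mat = [] is excluded by Pre_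
  (PySem.List.pyRange 0 (row - 1) 1).foldl (fun mv a =>
    (PySem.List.pyRange 0 (col - 1) 1).foldl (fun mv b =>
      (PySem.List.pyRange (a + 1) row 1).foldl (fun mv c =>
        (PySem.List.pyRange (b + 1) col 1).foldl (fun mv d =>
          if mv < pvGet2 mat c d - pvGet2 mat a b then pvGet2 mat c d - pvGet2 mat a b else mv)
          mv) mv) mv) 0

-- ===== PORT B =====
-- loop body of Source B's outer "for a in range(len(rows)-2, -1, -1)" loop
def altStep (col : Int) (rows : List (List Int)) (st : Option (List Int) × Int) (a : Int) :
    Option (List Int) × Int :=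
  let r := PySem.List.pyGetD rows (a + 1) []
  -- rs = r[:] ; for j in range(col-2,-1,-1): if rs[j] < rs[j+1]: rs[j] = rs[j+1]
  let rs := (PySem.List.pyRange (col - 2) (-1) (-1)).foldl (fun rs j =>
      if PySem.List.pyGetD rs j 0 < PySem.List.pyGetD rs (j + 1) 0
      then PySem.List.pySetD rs j (PySem.List.pyGetD rs (j + 1) 0) else rs) r
  let below := match st.1 with
    | none => rs
    | some bl => (rs.zip bl).map (fun xy => if xy.2 < xy.1 then xy.1 else xy.2)
  let cur := PySem.List.pyGetD rows a []
  let best := (PySem.List.pyRange 0 (col - 1) 1).foldl (fun best b =>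
      let v := PySem.List.pyGetD below (b + 1) 0 - PySem.List.pyGetD cur b 0
      if best < v then v else best) st.2
  (some below, best)

def findMaxVal_alt (mat : List (List Int)) : Int :=
  let col : Int := (mat.headD []).length   -- len(mat[0]); mat = [] is excluded by Pre_
  let rows := mat.map (fun r => PySem.List.slice r none (some col))   -- [r[:col] for r in mat]
  ((PySem.List.pyRange ((rows.length : Int) - 2) (-1) (-1)).foldl (altStep col rows)
    (none, 0)).2

-- ===== PRECONDITION & SPEC =====
-- Pre_ is exactly the set of inputs where A returns (A raises IndexError on the empty matrix
-- and, when it has at least 2 rows and 2 columns, on any later row shorter than the first row).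
def Pre_findMaxVal (mat : List (List Int)) : Prop :=
  mat ≠ [] ∧ (2 ≤ mat.length → 2 ≤ (mat.headD []).length →
    ∀ r ∈ mat.tail, (mat.headD []).length ≤ r.length)
instance (mat : List (List Int)) : Decidable (Pre_findMaxVal mat) := by
  unfold Pre_findMaxVal; infer_instance

def pvWitness_findMaxVal : List (List Int) := [[1, 2], [3, 4]]

def Spec_findMaxVal (mat : List (List Int)) (out : Int) : Prop := out = findMaxVal_alt mat
instance (mat : List (List Int)) (out : Int) : Decidable (Spec_findMaxVal mat out) := by
  unfold Spec_findMaxVal; infer_instance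

-- ===== CLAIM (what is proved, stated in full; the proofs are below) =====
def Claim_equal_findMaxVal : Prop :=
  ∀ (mat : List (List Int)), Dom_findMaxVal mat → Pre_findMaxVal mat →
    Spec_findMaxVal mat (findMaxVal mat)


-- ===== LEMMAS AND PROOFS =====

-- running maximum over a list, seeded with z
def sup1 (z : Int) (l : List Int) : Int := l.foldl max z
-- maximum of a nonempty list (0 on [], never used there)
def supNE : List Int → Int
  | [] => 0
  | x :: l => sup1 x l

-- region of cells in rows with index ≥ m, columns ≥ j, flattened row by row
def reg (rows : List (List Int)) (m j : Nat) : List Int :=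
  ((rows.drop m).map (fun r => r.drop j)).flatten

-- contribution of outer index a, folded over b
def innerN (rows : List (List Int)) (col : Nat) (a : Nat) (s : Int) : Int :=
  (List.range (col - 1)).foldl
    (fun s b => max s (supNE (reg rows (a + 1) (b + 1)) - (rows.getD a []).getD b 0)) s

-- common normal form of both programs
def nf (rows : List (List Int)) (col : Nat) : Int :=
  (List.range (rows.length - 1)).foldl (fun s a => innerN rows col a s) 0

-- suffix maxima of one row
def suffList (col : Nat) (r : List Int) : List Int :=
  (List.range col).map (fun j => supNE (r.drop j))

-- B's running "below" array: suffix maxima of the region from row m down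
def belowAt (rows : List (List Int)) (col m : Nat) : List Int :=
  (List.range col).map (fun j => supNE (reg rows m j))

lemma sup1_append (z : Int) (l1 l2 : List Int) : sup1 z (l1 ++ l2) = sup1 (sup1 z l1) l2 := by
  simp [sup1]

lemma sup1_max_left (l : List Int) : ∀ a b : Int, sup1 (max a b) l = max a (sup1 b l) := by
  induction l with
  | nil => intro a b; simp [sup1]
  | cons x t ih =>
      intro a b
      show sup1 (max (max a b) x) t = max a (sup1 (max b x) t)
      rw [max_assoc, ih]

lemma sup1_eq_max_supNE (z : Int) (l : List Int) (h : l ≠ []) : sup1 z l = max z (supNE l) := by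
  cases l with
  | nil => exact absurd rfl h
  | cons x t =>
      show sup1 (max z x) t = max z (sup1 x t)
      exact sup1_max_left t z x

lemma foldl_maxstep {β : Type} (f : β → Int) (l : List β) (s : Int) :
    l.foldl (fun s x => max s (f x)) s = sup1 s (l.map f) := by
  simp [sup1, List.foldl_map]

lemma sup1_map_sub (k : Int) (l : List Int) : ∀ z : Int,
    sup1 (z - k) (l.map (fun x => x - k)) = sup1 z l - k := by
  induction l with
  | nil => intro z; simp [sup1]
  | cons x t ih =>
      intro z
      show sup1 (max (z - k) (x - k)) (t.map (fun x => x - k)) = sup1 (max z x) t - k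
      have h : max (z - k) (x - k) = max z x - k := by omega
      rw [h, ih]

lemma supNE_map_sub (k : Int) (l : List Int) (h : l ≠ []) :
    supNE (l.map (fun x => x - k)) = supNE l - k := by
  cases l with
  | nil => exact absurd rfl h
  | cons x t =>
      show sup1 (x - k) (t.map (fun x => x - k)) = sup1 x t - k
      exact sup1_map_sub k t x

lemma supNE_append (l1 l2 : List Int) (h1 : l1 ≠ []) (h2 : l2 ≠ []) :
    supNE (l1 ++ l2) = max (supNE l1) (supNE l2) := by
  cases l1 with
  | nil => exact absurd rfl h1
  | cons x t =>
      show sup1 x (t ++ l2) = max (sup1 x t) (supNE l2)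
      rw [sup1_append, sup1_eq_max_supNE _ _ h2]

lemma foldl_comm_out {β : Type} (g : Int → β → Int)
    (h : ∀ s x y, g (g s x) y = g (g s y) x) :
    ∀ (l : List β) (s : Int) (x : β), l.foldl g (g s x) = g (l.foldl g s) x := by
  intro l
  induction l with
  | nil => intro s x; rfl
  | cons y t ih =>
      intro s x
      show t.foldl g (g (g s x) y) = g (t.foldl g (g s y)) x
      rw [h s x y, ih]

lemma foldl_reverse_comm {β : Type} (g : Int → β → Int)
    (h : ∀ s x y, g (g s x) y = g (g s y) x) :
    ∀ (l : List β) (s : Int), l.reverse.foldl g s = l.foldl g s := by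
  intro l
  induction l with
  | nil => intro s; rfl
  | cons x t ih =>
      intro s
      rw [List.reverse_cons, List.foldl_append]
      show g (t.reverse.foldl g s) x = t.foldl g (g s x)
      rw [ih, foldl_comm_out g h]

lemma if_max (s v : Int) : (if s < v then v else s) = max s v := by
  rcases lt_or_ge s v with h | h
  · rw [if_pos h, max_eq_right h.le]
  · rw [if_neg (not_lt.2 h), max_eq_left h]

lemma if_max' (x y : Int) : (if y < x then x else y) = max x y := by
  rcases lt_or_ge y x with h | h
  · rw [if_pos h, max_eq_left h.le]
  · rw [if_neg (not_lt.2 h), max_eq_right h]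

lemma drop_ne_nil {α : Type} (l : List α) (j : Nat) (h : j < l.length) : l.drop j ≠ [] := by
  apply List.ne_nil_of_length_pos
  rw [List.length_drop]
  omega

lemma getD_len (rows : List (List Int)) (col : Nat)
    (hrect : ∀ r ∈ rows, r.length = col) (a : Nat) (ha : a < rows.length) :
    (rows.getD a []).length = col := by
  rw [List.getD_eq_getElem _ _ ha]
  exact hrect _ (List.getElem_mem ha)

lemma reg_cons (rows : List (List Int)) (m j : Nat) (hm : m < rows.length) :
    reg rows m j = (rows.getD m []).drop j ++ reg rows (m + 1) j := by
  rw [List.getD_eq_getElem _ _ hm]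
  unfold reg
  rw [List.drop_eq_getElem_cons hm, List.map_cons, List.flatten_cons]

lemma reg_last (rows : List (List Int)) (j : Nat) (hm : rows ≠ []) :
    reg rows (rows.length - 1) j = (rows.getD (rows.length - 1) []).drop j := by
  have h : rows.length - 1 < rows.length := by
    cases rows with
    | nil => exact absurd rfl hm
    | cons x t => simp
  rw [reg_cons _ _ _ h]
  have : reg rows (rows.length - 1 + 1) j = [] := by
    unfold reg
    rw [List.drop_eq_nil_of_le (by omega)]
    rfl
  rw [this, List.append_nil]

lemma reg_ne_nil (rows : List (List Int)) (col m j : Nat)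
    (hrect : ∀ r ∈ rows, r.length = col) (hm : m < rows.length) (hj : j < col) :
    reg rows m j ≠ [] := by
  rw [reg_cons _ _ _ hm]
  have h1 : (rows.getD m []).drop j ≠ [] :=
    drop_ne_nil _ _ (by rw [getD_len rows col hrect m hm]; omega)
  exact fun hc => h1 (List.append_eq_nil_iff.1 hc).1

lemma belowAt_last (rows : List (List Int)) (col : Nat) (hm : rows ≠ []) :
    belowAt rows col (rows.length - 1) = suffList col (rows.getD (rows.length - 1) []) := by
  unfold belowAt suffList
  exact List.map_congr_left fun j _ => by rw [reg_last rows j hm]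

lemma combine_eq (rows : List (List Int)) (col m : Nat)
    (hrect : ∀ r ∈ rows, r.length = col) (hm1 : m + 1 < rows.length) :
    ((suffList col (rows.getD m [])).zip (belowAt rows col (m + 1))).map
      (fun xy => if xy.2 < xy.1 then xy.1 else xy.2) = belowAt rows col m := by
  unfold suffList belowAt
  rw [List.zip_map', List.map_map]
  apply List.map_congr_left
  intro j hj
  have hj' : j < col := List.mem_range.1 hj
  show (if supNE (reg rows (m + 1) j) < supNE ((rows.getD m []).drop j)
        then supNE ((rows.getD m []).drop j) else supNE (reg rows (m + 1) j)) =
      supNE (reg rows m j)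
  rw [if_max']
  conv_rhs => rw [reg_cons rows m j (by omega)]
  rw [supNE_append _ _ (drop_ne_nil _ _ (by rw [getD_len rows col hrect m (by omega)]; omega))
      (reg_ne_nil rows col (m + 1) j hrect hm1 hj')]

-- the j-sweep inside altStep builds the suffix maxima of r (r of length col ≥ 2)
def mixr (r : List Int) (t : Nat) : List Int :=
  (List.range r.length).map (fun j => if j < t then r.getD j 0 else supNE (r.drop j))

lemma supNE_drop_succ (r : List Int) (t : Nat) (ht : t + 1 < r.length) :
    supNE (r.drop t) = max (r.getD t 0) (supNE (r.drop (t + 1))) := by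
  rw [List.drop_eq_getElem_cons (show t < r.length by omega)]
  show sup1 r[t] (r.drop (t + 1)) = max (r.getD t 0) (supNE (r.drop (t + 1)))
  rw [sup1_eq_max_supNE _ _ (drop_ne_nil _ _ ht), List.getD_eq_getElem _ _ (by omega)]

lemma length_mixr (r : List Int) (t : Nat) : (mixr r t).length = r.length := by
  simp [mixr]

lemma getElem_mixr (r : List Int) (t j : Nat) (hj : j < (mixr r t).length) :
    (mixr r t)[j] = if j < t then r.getD j 0 else supNE (r.drop j) := by
  simp [mixr]

lemma sstep_mixr (r : List Int) (t : Nat) (ht : t + 2 ≤ r.length) :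
    (if PySem.List.pyGetD (mixr r (t + 1)) (t : Int) 0 <
          PySem.List.pyGetD (mixr r (t + 1)) ((t : Int) + 1) 0
      then PySem.List.pySetD (mixr r (t + 1)) (t : Int)
          (PySem.List.pyGetD (mixr r (t + 1)) ((t : Int) + 1) 0)
      else mixr r (t + 1)) = mixr r t := by
  have hc1 : ((t : Int) + 1) = ((t + 1 : Nat) : Int) := by push_cast; ring
  have hlen := length_mixr r (t + 1)
  have hget_t : PySem.List.pyGetD (mixr r (t + 1)) (t : Int) 0 = r.getD t 0 := by
    rw [PySem.List.pyGetD_natCast, List.getD_eq_getElem _ _ (by omega),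
      getElem_mixr r (t + 1) t (by omega)]
    simp
  have hget_t1 : PySem.List.pyGetD (mixr r (t + 1)) ((t : Int) + 1) 0 =
      supNE (r.drop (t + 1)) := by
    rw [hc1, PySem.List.pyGetD_natCast, List.getD_eq_getElem _ _ (by omega),
      getElem_mixr r (t + 1) (t + 1) (by omega)]
    simp
  rw [hget_t, hget_t1]
  by_cases h : r.getD t 0 < supNE (r.drop (t + 1))
  · rw [if_pos h, PySem.List.pySetD_natCast]
    apply List.ext_getElem (by simp [length_mixr])
    intro j hj hj2
    rw [List.getElem_set, getElem_mixr r t j hj2]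
    by_cases hjt : j = t
    · subst hjt
      rw [if_pos rfl, if_neg (by omega), supNE_drop_succ r j (by omega)]
      omega
    · rw [if_neg (fun h' => hjt h'.symm),
        getElem_mixr r (t + 1) j (by rw [length_mixr]; rw [length_mixr] at hj2; omega)]
      rcases Nat.lt_or_ge j t with hlt | hge
      · rw [if_pos (by omega), if_pos hlt]
      · rw [if_neg (by omega), if_neg (by omega)]
  · rw [if_neg h]
    apply List.ext_getElem (by simp [length_mixr])
    intro j hj hj2
    rw [getElem_mixr r (t + 1) j hj, getElem_mixr r t j hj2]
    by_cases hjt : j = t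
    · subst hjt
      rw [if_pos (by omega), if_neg (by omega), supNE_drop_succ r j (by omega)]
      omega
    · rcases Nat.lt_or_ge j t with hlt | hge
      · rw [if_pos (by omega), if_pos hlt]
      · rw [if_neg (by omega), if_neg (by omega)]

lemma sweep_inv (r : List Int) :
    ∀ t : Nat, t + 1 ≤ r.length →
      ((List.range t).reverse.foldl (fun rs (j : Nat) =>
        if PySem.List.pyGetD rs (j : Int) 0 < PySem.List.pyGetD rs ((j : Int) + 1) 0
        then PySem.List.pySetD rs (j : Int) (PySem.List.pyGetD rs ((j : Int) + 1) 0)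
        else rs) (mixr r t)) = mixr r 0 := by
  intro t
  induction t with
  | zero => intro _; rfl
  | succ t ih =>
      intro ht
      rw [List.range_succ, List.reverse_append]
      show (List.foldl _ _ (t :: (List.range t).reverse)) = mixr r 0
      rw [List.foldl_cons, sstep_mixr r t (by omega)]
      exact ih (by omega)

lemma mixr_init (r : List Int) (col : Nat) (hr : r.length = col) (hcol : 1 ≤ col) :
    mixr r (col - 1) = r := by
  apply List.ext_getElem (by simp [length_mixr])
  intro j hj hj2
  rw [getElem_mixr r (col - 1) j hj]
  by_cases h : j < col - 1
  · rw [if_pos h, List.getD_eq_getElem _ _ (by omega)]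
  · rw [if_neg h]
    have hj3 : j = col - 1 := by rw [length_mixr, hr] at hj; omega
    subst hj3
    have h1 : r.drop (col - 1) = [r[col - 1]] := by
      rw [List.drop_eq_getElem_cons (by omega)]
      have h2 : r.drop (col - 1 + 1) = ([] : List Int) := List.drop_eq_nil_of_le (by omega)
      rw [h2]
    rw [h1]
    rfl

lemma mixr_zero (r : List Int) (col : Nat) (hr : r.length = col) :
    mixr r 0 = suffList col r := by
  unfold mixr suffList
  rw [hr]
  exact List.map_congr_left fun j _ => by simp

lemma sweep_spec (r : List Int) (col : Nat) (hr : r.length = col) (hcol : 2 ≤ col) :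
    (PySem.List.pyRange ((col : Int) - 2) (-1) (-1)).foldl (fun rs j =>
      if PySem.List.pyGetD rs j 0 < PySem.List.pyGetD rs (j + 1) 0
      then PySem.List.pySetD rs j (PySem.List.pyGetD rs (j + 1) 0) else rs) r =
    suffList col r := by
  rw [show ((col : Int) - 2) = (0 : Int) - 1 + ((col : Int) - 1) from by ring]
  rw [show PySem.List.pyRange ((0 : Int) - 1 + ((col : Int) - 1)) (-1) (-1) =
      PySem.List.pyRange (((col : Int) - 2)) (-1) (-1) from by ring_nf]
  rw [PySem.List.pyRange_neg_one_eq_reverse]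
  rw [show (-1 : Int) + 1 = 0 from by ring, show ((col : Int) - 2) + 1 = ((col - 1 : Nat) : Int) from by omega]
  rw [PySem.List.pyRange_zero_nat, ← List.map_reverse, List.foldl_map]
  have h0 := sweep_inv r (col - 1) (by omega)
  rw [mixr_init r col hr (by omega)] at h0
  rw [h0, mixr_zero r col hr]

lemma rows_rect (mat : List (List Int)) (col : Nat) (hlen : ∀ r ∈ mat, col ≤ r.length) :
    ∀ r ∈ mat.map (fun r => r.take col), r.length = col := by
  intro r hr
  obtain ⟨r', hr', rfl⟩ := List.mem_map.1 hr
  rw [List.length_take]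
  have := hlen r' hr'
  omega

lemma pvGet2_eq (mat : List (List Int)) (col : Nat) (a b : Nat)
    (ha : a < mat.length) (hb : b < col) (hlen : ∀ r ∈ mat, col ≤ r.length) :
    pvGet2 mat (a : Int) (b : Int) = ((mat.map (fun r => r.take col)).getD a []).getD b 0 := by
  unfold pvGet2
  rw [PySem.List.pyGetD_natCast, PySem.List.pyGetD_natCast,
    List.getD_eq_getElem _ _ ha,
    List.getD_eq_getElem (mat.map (fun r => r.take col)) _ (by simpa using ha),
    List.getElem_map,
    List.getD_eq_getElem _ _ (show b < mat[a].length from by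
      have := hlen _ (List.getElem_mem ha); omega),
    List.getD_eq_getElem _ _ (show b < (mat[a].take col).length from by
      rw [List.length_take]; have := hlen _ (List.getElem_mem ha); omega)]
  exact (List.getElem_take).symm

lemma rowSeg (r : List Int) (j col : Nat) (hcol : col ≤ r.length) :
    (PySem.List.pyRange ((j : Nat) : Int) ((col : Nat) : Int) 1).map
      (fun d => PySem.List.pyGetD r d 0) = (r.take col).drop j := by
  rcases Nat.lt_or_ge col j with hj | hj
  · rw [PySem.List.pyRange_one_eq_nil (by omega),
      List.drop_eq_nil_of_le (by rw [List.length_take]; omega)]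
    rfl
  · rw [PySem.List.pyRange_one, List.map_map,
      show (((col : Int) - (j : Int)).toNat) = col - j from by omega]
    apply List.ext_getElem
    · simp
      omega
    · intro i hi1 hi2
      rw [List.getElem_map, List.getElem_range]
      show PySem.List.pyGetD r ((j : Int) + (i : Int)) 0 = _
      have hjr : j + i < r.length := by
        rw [List.length_map, List.length_range] at hi1; omega
      rw [show ((j : Int) + (i : Int)) = ((j + i : Nat) : Int) from by push_cast; ring,
        PySem.List.pyGetD_natCast, List.getD_eq_getElem _ _ hjr,
        List.getElem_drop, List.getElem_take]

lemma foldl_sup1_flat {β : Type} (h : β → List Int) (l : List β) : ∀ s : Int,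
    l.foldl (fun s c => (h c).foldl max s) s = sup1 s ((l.map h).flatten) := by
  induction l with
  | nil => intro s; simp [sup1]
  | cons x t ih =>
      intro s
      show t.foldl _ ((h x).foldl max s) = sup1 s (h x ++ (t.map h).flatten)
      rw [ih, sup1_append]
      rfl

lemma cd_fold (mat : List (List Int)) (col : Nat) (hlen : ∀ r ∈ mat, col ≤ r.length)
    (a b : Nat) (ha : a + 1 < mat.length) (hb : b + 1 < col) (mv : Int) :
    (PySem.List.pyRange ((a : Int) + 1) ((mat.length : Nat) : Int) 1).foldl (fun mv c =>
      (PySem.List.pyRange ((b : Int) + 1) ((col : Nat) : Int) 1).foldl (fun mv d =>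
        if mv < pvGet2 mat c d - pvGet2 mat (a : Int) (b : Int)
        then pvGet2 mat c d - pvGet2 mat (a : Int) (b : Int) else mv) mv) mv =
    max mv (supNE (reg (mat.map (fun r => r.take col)) (a + 1) (b + 1)) -
      ((mat.map (fun r => r.take col)).getD a []).getD b 0) := by
  have hg : pvGet2 mat (a : Int) (b : Int) =
      ((mat.map (fun r => r.take col)).getD a []).getD b 0 :=
    pvGet2_eq mat col a b (by omega) (by omega) hlen
  have hregne : reg (mat.map (fun r => r.take col)) (a + 1) (b + 1) ≠ [] :=
    reg_ne_nil _ col _ _ (rows_rect mat col hlen) (by simpa using ha) hb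
  have step1 : (PySem.List.pyRange ((a : Int) + 1) ((mat.length : Nat) : Int) 1).foldl (fun mv c =>
      (PySem.List.pyRange ((b : Int) + 1) ((col : Nat) : Int) 1).foldl (fun mv d =>
        if mv < pvGet2 mat c d - pvGet2 mat (a : Int) (b : Int)
        then pvGet2 mat c d - pvGet2 mat (a : Int) (b : Int) else mv) mv) mv =
    (PySem.List.pyRange ((a : Int) + 1) ((mat.length : Nat) : Int) 1).foldl (fun mv c =>
      ((((PySem.List.pyGetD mat c []).take col).drop (b + 1)).map
        (fun x => x - ((mat.map (fun r => r.take col)).getD a []).getD b 0)).foldl max mv) mv := by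
    apply PySem.List.foldl_congr_mem
    intro acc c hc
    obtain ⟨h1, h2⟩ := PySem.List.mem_pyRange_one.1 hc
    obtain ⟨cn, rfl⟩ : ∃ cn : Nat, c = (cn : Int) :=
      ⟨c.toNat, (Int.toNat_of_nonneg (by omega)).symm⟩
    have hcn1 : a + 1 ≤ cn := by omega
    have hcn2 : cn < mat.length := by omega
    simp only [if_max, hg]
    rw [foldl_maxstep]
    have hmap : (PySem.List.pyRange ((b : Int) + 1) ((col : Nat) : Int) 1).map
        (fun d => pvGet2 mat (cn : Int) d -
          ((mat.map (fun r => r.take col)).getD a []).getD b 0) =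
        (((PySem.List.pyGetD mat (cn : Int) []).take col).drop (b + 1)).map
          (fun x => x - ((mat.map (fun r => r.take col)).getD a []).getD b 0) := by
      have hco : (fun d => pvGet2 mat (cn : Int) d -
            ((mat.map (fun r => r.take col)).getD a []).getD b 0) =
          (fun x => x - ((mat.map (fun r => r.take col)).getD a []).getD b 0) ∘
            (fun d => PySem.List.pyGetD (PySem.List.pyGetD mat (cn : Int) []) d 0) := rfl
      rw [hco, ← List.map_map]
      congr 1
      rw [show ((b : Int) + 1) = ((b + 1 : Nat) : Int) from by push_cast; ring]
      exact rowSeg (PySem.List.pyGetD mat (cn : Int) []) (b + 1) col (by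
        rw [PySem.List.pyGetD_natCast, List.getD_eq_getElem _ _ hcn2]
        exact hlen _ (List.getElem_mem hcn2))
    rw [hmap]
    rfl
  rw [step1, foldl_sup1_flat]
  have hflat : ((PySem.List.pyRange ((a : Int) + 1) ((mat.length : Nat) : Int) 1).map
        (fun c => (((PySem.List.pyGetD mat c []).take col).drop (b + 1)).map
          (fun x => x - ((mat.map (fun r => r.take col)).getD a []).getD b 0))).flatten =
      (reg (mat.map (fun r => r.take col)) (a + 1) (b + 1)).map
        (fun x => x - ((mat.map (fun r => r.take col)).getD a []).getD b 0) := by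
    have hco : (fun c => (((PySem.List.pyGetD mat c []).take col).drop (b + 1)).map
          (fun x => x - ((mat.map (fun r => r.take col)).getD a []).getD b 0)) =
        (List.map (fun x => x - ((mat.map (fun r => r.take col)).getD a []).getD b 0)) ∘
          ((fun r => (r.take col).drop (b + 1)) ∘ (fun c => PySem.List.pyGetD mat c [])) := rfl
    rw [hco, ← List.map_map, ← List.map_map, ← List.map_flatten]
    congr 1
    have hpg : (PySem.List.pyRange ((a : Int) + 1) ((mat.length : Nat) : Int) 1).map
        (fun c => PySem.List.pyGetD mat c []) = mat.drop (a + 1) := by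
      rw [show ((a : Int) + 1) = ((a + 1 : Nat) : Int) from by push_cast; ring]
      have := PySem.List.map_pyGetD_pyRange' mat ([] : List Int)
        (a := ((a + 1 : Nat) : Int)) (by omega)
      simpa using this
    rw [hpg]
    unfold reg
    rw [← List.map_drop, List.map_map]
    rfl
  rw [hflat, sup1_eq_max_supNE _ _ (by
      intro hx
      exact hregne (List.map_eq_nil_iff.1 hx)),
    supNE_map_sub _ _ hregne]

lemma A_main (mat : List (List Int)) (hn : 2 ≤ mat.length) (hc : 2 ≤ (mat.headD []).length)
    (hlen : ∀ r ∈ mat, (mat.headD []).length ≤ r.length) :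
    findMaxVal mat =
      nf (mat.map (fun r => r.take (mat.headD []).length)) (mat.headD []).length := by
  simp only [findMaxVal]
  rw [show ((mat.length : Int) - 1) = ((mat.length - 1 : Nat) : Int) from by omega,
    show (((mat.headD []).length : Int) - 1) = (((mat.headD []).length - 1 : Nat) : Int) from by
      omega,
    PySem.List.pyRange_zero_nat, PySem.List.pyRange_zero_nat, List.foldl_map]
  simp only [List.foldl_map]
  unfold nf innerN
  rw [List.length_map]
  apply PySem.List.foldl_congr_mem
  intro s a hamem
  have ha : a < mat.length - 1 := List.mem_range.1 hamem
  apply PySem.List.foldl_congr_mem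
  intro s' b hbmem
  have hb : b < (mat.headD []).length - 1 := List.mem_range.1 hbmem
  exact cd_fold mat (mat.headD []).length hlen a b (by omega) (by omega) s'

lemma foldl_id {β : Type} (l : List β) : ∀ z : Int, l.foldl (fun s _ => s) z = z := by
  induction l with
  | nil => intro z; rfl
  | cons x t ih => intro z; exact ih z

lemma A_deg (mat : List (List Int))
    (h : mat.length ≤ 1 ∨ (mat.headD []).length ≤ 1) : findMaxVal mat = 0 := by
  simp only [findMaxVal]
  rcases h with h | h
  · rw [PySem.List.pyRange_one_eq_nil (show (mat.length : Int) - 1 ≤ 0 from by omega)]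
    rfl
  · rw [PySem.List.pyRange_one_eq_nil
      (show (((mat.headD []).length : Int) - 1) ≤ 0 from by omega)]
    simp only [List.foldl_nil]
    exact foldl_id _ 0

lemma altStep_snd_deg (colI : Int) (hc : colI - 1 ≤ 0) (rows : List (List Int))
    (st : Option (List Int) × Int) (aI : Int) : (altStep colI rows st aI).2 = st.2 := by
  simp only [altStep]
  rw [PySem.List.pyRange_one_eq_nil hc]
  rfl

lemma B_snd_fix (colI : Int) (hc : colI - 1 ≤ 0) (rows : List (List Int)) :
    ∀ (l : List Int) (st : Option (List Int) × Int),
      (l.foldl (altStep colI rows) st).2 = st.2 := by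
  intro l
  induction l with
  | nil => intro st; rfl
  | cons x t ih => intro st; rw [List.foldl_cons, ih, altStep_snd_deg colI hc]

lemma B_deg (mat : List (List Int))
    (h : mat.length ≤ 1 ∨ (mat.headD []).length ≤ 1) : findMaxVal_alt mat = 0 := by
  simp only [findMaxVal_alt]
  rcases h with h | h
  · rw [PySem.List.pyRange_neg_one_eq_nil
      (show (((mat.map (fun r => PySem.List.slice r none (some ((mat.headD []).length : Int)))).length : Int) - 2) ≤ -1 from by
        rw [List.length_map]; omega)]
    rfl
  · exact B_snd_fix _ (by omega) _ _ _

lemma altStep_some (rows : List (List Int)) (col : Nat)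
    (hrect : ∀ r ∈ rows, r.length = col) (hcol : 2 ≤ col) (a : Nat)
    (ha : a + 2 < rows.length) (s : Int) :
    altStep (col : Int) rows (some (belowAt rows col (a + 2)), s) (a : Int) =
    (some (belowAt rows col (a + 1)), innerN rows col a s) := by
  simp only [altStep]
  rw [show ((a : Int) + 1) = ((a + 1 : Nat) : Int) from by push_cast; ring,
    PySem.List.pyGetD_natCast rows (a + 1) [],
    sweep_spec (rows.getD (a + 1) []) col (getD_len rows col hrect (a + 1) (by omega)) hcol,
    combine_eq rows col (a + 1) hrect (by omega),
    PySem.List.pyGetD_natCast rows a [],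
    show (((col : Nat) : Int) - 1) = ((col - 1 : Nat) : Int) from by omega,
    PySem.List.pyRange_zero_nat, List.foldl_map]
  congr 1
  unfold innerN
  apply PySem.List.foldl_congr_mem
  intro acc b hbmem
  have hb : b < col - 1 := List.mem_range.1 hbmem
  rw [show ((b : Int) + 1) = ((b + 1 : Nat) : Int) from by push_cast; ring,
    PySem.List.pyGetD_natCast, PySem.List.pyGetD_natCast]
  unfold belowAt
  rw [PySem.List.getD_map_range _ _ _ _ (show b + 1 < col from by omega), if_max]

lemma altStep_none (rows : List (List Int)) (col : Nat)
    (hrect : ∀ r ∈ rows, r.length = col) (hcol : 2 ≤ col) (hn : 2 ≤ rows.length) (s : Int) :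
    altStep (col : Int) rows (none, s) ((rows.length - 2 : Nat) : Int) =
    (some (belowAt rows col (rows.length - 1)), innerN rows col (rows.length - 2) s) := by
  have hne : rows ≠ [] := by intro h; rw [h] at hn; simp at hn
  simp only [altStep]
  rw [show (((rows.length - 2 : Nat) : Int) + 1) = ((rows.length - 1 : Nat) : Int) from by
      omega,
    PySem.List.pyGetD_natCast rows (rows.length - 1) [],
    sweep_spec (rows.getD (rows.length - 1) []) col
      (getD_len rows col hrect (rows.length - 1) (by omega)) hcol,
    ← belowAt_last rows col hne,
    PySem.List.pyGetD_natCast rows (rows.length - 2) [],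
    show (((col : Nat) : Int) - 1) = ((col - 1 : Nat) : Int) from by omega,
    PySem.List.pyRange_zero_nat, List.foldl_map]
  congr 1
  unfold innerN
  rw [show rows.length - 2 + 1 = rows.length - 1 from by omega]
  apply PySem.List.foldl_congr_mem
  intro acc b hbmem
  have hb : b < col - 1 := List.mem_range.1 hbmem
  rw [show ((b : Int) + 1) = ((b + 1 : Nat) : Int) from by push_cast; ring,
    PySem.List.pyGetD_natCast, PySem.List.pyGetD_natCast]
  unfold belowAt
  rw [PySem.List.getD_map_range _ _ _ _ (show b + 1 < col from by omega), if_max]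

lemma loopB (rows : List (List Int)) (col : Nat)
    (hrect : ∀ r ∈ rows, r.length = col) (hcol : 2 ≤ col) :
    ∀ m : Nat, 1 ≤ m → m + 2 ≤ rows.length → ∀ s : Int,
      ((List.range m).reverse.foldl
        (fun st (k : Nat) => altStep (col : Int) rows st (k : Int))
        (some (belowAt rows col (m + 1)), s)) =
      (some (belowAt rows col 1),
        (List.range m).reverse.foldl (fun s a => innerN rows col a s) s) := by
  intro m
  induction m with
  | zero => intro h; exact absurd h (by omega)
  | succ m ih =>
      intro h1 h2 s
      rw [List.range_succ, List.reverse_append]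
      simp only [List.reverse_cons, List.reverse_nil, List.nil_append, List.singleton_append,
        List.foldl_cons]
      rw [altStep_some rows col hrect hcol m (by omega) s]
      by_cases hm : m = 0
      · subst hm; rfl
      · exact ih (by omega) (by omega) (innerN rows col m s)

lemma B_main (mat : List (List Int)) (hn : 2 ≤ mat.length) (hc : 2 ≤ (mat.headD []).length)
    (hlen : ∀ r ∈ mat, (mat.headD []).length ≤ r.length) :
    findMaxVal_alt mat =
      nf (mat.map (fun r => r.take (mat.headD []).length)) (mat.headD []).length := by
  have hrect := rows_rect mat (mat.headD []).length hlen
  simp only [findMaxVal_alt, PySem.List.slice_to_natCast]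
  rw [PySem.List.pyRange_neg_one_eq_reverse,
    show ((-1 : Int) + 1) = 0 from by ring,
    show (((mat.map (fun r => r.take (mat.headD []).length)).length : Int) - 2 + 1) =
        ((mat.length - 1 : Nat) : Int) from by rw [List.length_map]; omega,
    PySem.List.pyRange_zero_nat, ← List.map_reverse, List.foldl_map]
  have hsplit : mat.length - 1 = (mat.length - 2) + 1 := by omega
  rw [hsplit, List.range_succ, List.reverse_append]
  simp only [List.reverse_cons, List.reverse_nil, List.nil_append, List.singleton_append]
  rw [List.foldl_cons]
  have h0 := altStep_none (mat.map (fun r => r.take (mat.headD []).length))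
    (mat.headD []).length hrect hc (by rw [List.length_map]; omega) 0
  rw [List.length_map] at h0
  rw [h0]
  -- inner contributions, named
  have hK : ∀ (a : Nat) (s : Int),
      innerN (mat.map (fun r => r.take (mat.headD []).length)) (mat.headD []).length a s =
      max s (supNE ((List.range ((mat.headD []).length - 1)).map (fun b =>
        supNE (reg (mat.map (fun r => r.take (mat.headD []).length)) (a + 1) (b + 1)) -
        ((mat.map (fun r => r.take (mat.headD []).length)).getD a []).getD b 0))) := by
    intro a s
    unfold innerN
    rw [foldl_maxstep, sup1_eq_max_supNE _ _ (by
      simp only [ne_eq, List.map_eq_nil_iff, List.range_eq_nil]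
      omega)]
  have hcomm : ∀ (s : Int) (x y : Nat),
      innerN (mat.map (fun r => r.take (mat.headD []).length)) (mat.headD []).length y
        (innerN (mat.map (fun r => r.take (mat.headD []).length)) (mat.headD []).length x s) =
      innerN (mat.map (fun r => r.take (mat.headD []).length)) (mat.headD []).length x
        (innerN (mat.map (fun r => r.take (mat.headD []).length)) (mat.headD []).length y s) := by
    intro s x y
    rw [hK, hK, hK, hK]
    exact max_right_comm s _ _
  by_cases hm : mat.length = 2
  · simp only [hm]
    show innerN _ _ (2 - 2) 0 = nf _ _
    unfold nf
    rw [List.length_map, hm]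
    rfl
  · have hLB := loopB (mat.map (fun r => r.take (mat.headD []).length))
      (mat.headD []).length hrect hc (mat.length - 2) (by omega)
      (by rw [List.length_map]; omega)
      (innerN (mat.map (fun r => r.take (mat.headD []).length)) (mat.headD []).length
        (mat.length - 2) 0)
    rw [show mat.length - 2 + 1 = mat.length - 1 from by omega] at hLB
    rw [hLB]
    show (List.range (mat.length - 2)).reverse.foldl _ _ = _
    have hre : (List.range (mat.length - 2)).reverse.foldl
        (fun s a => innerN (mat.map (fun r => r.take (mat.headD []).length))
          (mat.headD []).length a s)
        (innerN (mat.map (fun r => r.take (mat.headD []).length)) (mat.headD []).length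
          (mat.length - 2) 0) =
        (List.range (mat.length - 1)).reverse.foldl
          (fun s a => innerN (mat.map (fun r => r.take (mat.headD []).length))
            (mat.headD []).length a s) 0 := by
      rw [hsplit, List.range_succ, List.reverse_append]
      simp only [List.reverse_cons, List.reverse_nil, List.nil_append, List.singleton_append]
      rw [List.foldl_cons]
    rw [hre, foldl_reverse_comm _ hcomm]
    unfold nf
    rw [List.length_map]

-- ===== VERDICT (by name: the statement is the Claim_ definition above) =====
theorem findMaxVal_spec : Claim_equal_findMaxVal := by
  intro mat _ hpre
  obtain ⟨hne, htail⟩ := hpre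
  show findMaxVal mat = findMaxVal_alt mat
  by_cases hn : 2 ≤ mat.length
  · by_cases hc : 2 ≤ (mat.headD []).length
    · have hlen : ∀ r ∈ mat, (mat.headD []).length ≤ r.length := by
        intro r hr
        cases mat with
        | nil => exact absurd rfl hne
        | cons r0 rest =>
            rcases List.mem_cons.1 hr with rfl | hr'
            · simp
            · exact htail hn hc r hr'
      rw [A_main mat hn hc hlen, B_main mat hn hc hlen]
    · rw [A_deg mat (Or.inr (by omega)), B_deg mat (Or.inr (by omega))]
  · rw [A_deg mat (Or.inl (by omega)), B_deg mat (Or.inl (by omega))]
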